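-- pv_equiv track=rewrite | github.com/afaqmvirk/carleton-leetcode-games-workshop | 11SOL.py | ddakji_flip_count_and_orientation
-- ===== SOURCE A (Python) =====
-- def ddakji_flip_count_and_orientation(flips: str):
--     # Define the initial orientation as a 1D array
--     original_orientation = ["A", "B", "C", "D"]
--     current_orientation = ["A", "B", "C", "D"]
--     flip_count = 0  # Count how many times it returns to the original orientation
--
--     # Map to track the effects of flips
--     vertical_flip = [2, 3, 0, 1]   # Swap top and bottom rows
--     horizontal_flip = [1, 0, 3, 2]  # Swap left and right columns
--
--     for flip in flips:
--         if flip == "V":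
--             # Apply vertical flip
--             current_orientation = [current_orientation[i] for i in vertical_flip]
--         elif flip == "H":
--             # Apply horizontal flip
--             current_orientation = [current_orientation[i] for i in horizontal_flip]
--
--         # Check if the current orientation matches the original
--         if current_orientation == original_orientation:
--             flip_count += 1
--
--     # Return the results
--     return flip_count, current_orientation
-- ===== SOURCE B (Python) =====
-- def ddakji_flip_count_and_orientation(flips: str):
--     # Track orientation as two parity bits: v = V-flips mod 2, h = H-flips mod 2.
--     v = h = 0
--     flip_count = 0
--     for flip in flips:
--         if flip == "V":
--             v ^= 1
--         elif flip == "H":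
--             h ^= 1
--         if v == 0 and h == 0:
--             flip_count += 1
--     table = {
--         (0, 0): ["A", "B", "C", "D"],
--         (1, 0): ["C", "D", "A", "B"],
--         (0, 1): ["B", "A", "D", "C"],
--         (1, 1): ["D", "C", "B", "A"],
--     }
--     return flip_count, table[(v, h)]
-- ===== Notes on version B (the rewrite author's own statement) =====
-- stated objective: simpler
-- what changed: B replaces the list-permutation state with two parity bits (V and H flips commute and are involutions), counting returns when both parities are zero and reconstructing the final orientation from a fixed 4-entry table.
import Mathlib
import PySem

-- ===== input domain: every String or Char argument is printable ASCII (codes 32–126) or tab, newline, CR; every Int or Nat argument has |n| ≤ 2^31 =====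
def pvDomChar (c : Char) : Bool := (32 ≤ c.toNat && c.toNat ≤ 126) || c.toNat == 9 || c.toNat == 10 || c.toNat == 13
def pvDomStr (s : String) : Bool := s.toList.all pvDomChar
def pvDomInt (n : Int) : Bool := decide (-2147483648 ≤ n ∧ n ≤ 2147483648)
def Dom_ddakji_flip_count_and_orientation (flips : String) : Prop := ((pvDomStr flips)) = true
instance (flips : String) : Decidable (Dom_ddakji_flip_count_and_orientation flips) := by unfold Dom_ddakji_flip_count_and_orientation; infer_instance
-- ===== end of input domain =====

-- B replaces A's list-permutation state with two parity bits and a fixed final-orientation table (simpler state).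


-- ===== PORT A =====
-- one loop step of A: apply the flip (if 'V'/'H') by re-indexing the orientation list, then bump the count on a match
def pvAStep (st : Int × List String) (flip : Char) : Int × List String :=
  let cur :=
    if flip = 'V' then [2, 3, 0, 1].map (fun i => (PySem.List.pyGet? st.2 i).getD "")
    else if flip = 'H' then [1, 0, 3, 2].map (fun i => (PySem.List.pyGet? st.2 i).getD "")
    else st.2
  if cur = ["A", "B", "C", "D"] then (st.1 + 1, cur) else (st.1, cur)

def ddakji_flip_count_and_orientation (flips : String) : Int × List String :=
  flips.toList.foldl pvAStep (0, ["A", "B", "C", "D"])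

-- ===== PORT B =====
def pvBStep (st : Int × Bool × Bool) (flip : Char) : Int × Bool × Bool :=
  let v := if flip = 'V' then !st.2.1 else st.2.1
  let h := if flip = 'H' then !st.2.2 else st.2.2
  if v = false ∧ h = false then (st.1 + 1, v, h) else (st.1, v, h)

def pvTable (v h : Bool) : List String :=
  match v, h with
  | false, false => ["A", "B", "C", "D"]
  | true,  false => ["C", "D", "A", "B"]
  | false, true  => ["B", "A", "D", "C"]
  | true,  true  => ["D", "C", "B", "A"]

def ddakji_flip_count_and_orientation_alt (flips : String) : Int × List String :=
  let st := flips.toList.foldl pvBStep (0, false, false)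
  (st.1, pvTable st.2.1 st.2.2)

-- ===== PRECONDITION & SPEC =====
def Spec_ddakji_flip_count_and_orientation (flips : String) (out : Int × List String) : Prop := out = ddakji_flip_count_and_orientation_alt flips
instance (flips : String) (out : Int × List String) : Decidable (Spec_ddakji_flip_count_and_orientation flips out) := by unfold Spec_ddakji_flip_count_and_orientation; infer_instance

-- ===== CLAIM (what is proved, stated in full; the proofs are below) =====
def Claim_equal_ddakji_flip_count_and_orientation : Prop := ∀ (flips : String), Dom_ddakji_flip_count_and_orientation flips → Spec_ddakji_flip_count_and_orientation flips (ddakji_flip_count_and_orientation flips)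

-- ===== LEMMAS AND PROOFS =====

-- one step of A on a table state is a table state with the parities stepped by B
theorem pvStep_sim (c : Char) (n : Int) (v h : Bool) :
    pvAStep (n, pvTable v h) c =
      ((pvBStep (n, v, h) c).1, pvTable (pvBStep (n, v, h) c).2.1 (pvBStep (n, v, h) c).2.2) := by
  by_cases hV : c = 'V' <;> by_cases hH : c = 'H' <;>
    cases v <;> cases h <;>
    simp [pvAStep, pvBStep, pvTable, hV, hH, PySem.List.pyGet?, PySem.List.pyIdx?]

-- the whole fold preserves the simulation
theorem pvFold_sim (l : List Char) (n : Int) (v h : Bool) :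
    l.foldl pvAStep (n, pvTable v h) =
      ((l.foldl pvBStep (n, v, h)).1,
        pvTable (l.foldl pvBStep (n, v, h)).2.1 (l.foldl pvBStep (n, v, h)).2.2) := by
  induction l generalizing n v h with
  | nil => rfl
  | cons c t ih =>
      simp only [List.foldl_cons, pvStep_sim]
      exact ih _ _ _

-- ===== VERDICT (by name: the statement is the Claim_ definition above) =====
theorem ddakji_flip_count_and_orientation_spec : Claim_equal_ddakji_flip_count_and_orientation := by
  intro flips _
  show _ = _
  simpa [ddakji_flip_count_and_orientation, ddakji_flip_count_and_orientation_alt] using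
    pvFold_sim flips.toList 0 false false
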